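-- pv_equiv track=rewrite | github.com/GreatSnoopyMe/TF-project | Node.py | tracking_by_pos
-- ===== SOURCE A (Python) =====
-- from collections import deque
--
-- def tracking_by_pos(Node_ID):
--     """Find the tracks that generate current Node. Until Ends in Head. Used
--     on leaves"""
--     res = deque()
--     tmp = Node_ID
--     while tmp != 0:
--         res.appendleft(tmp)
--         tmp = (tmp - 1) // 5
--     res.appendleft(0)
--     return list(res)
-- ===== SOURCE B (Python) =====
-- def _parent(n):
--     return (n - 1) // 5
--
-- def _depth(n):
--     d = 0
--     while n != 0:
--         n = _parent(n)
--         d += 1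
--     return d
--
-- def _ancestor(n, k):
--     for _ in range(k):
--         n = _parent(n)
--     return n
--
-- def tracking_by_pos(Node_ID):
--     """Find the tracks that generate current Node. Until Ends in Head. Used
--     on leaves"""
--     D = _depth(Node_ID)
--     return [_ancestor(Node_ID, D - i) for i in range(D + 1)]
-- ===== Notes on version B (the rewrite author's own statement) =====
-- stated objective: alternative
-- what changed: Instead of walking upward while appendleft-ing into a deque, B first computes the node's depth D and then builds the root-first list forward as a comprehension [ancestor(Node_ID, D-i) for i in range(D+1)], recomputing each ancestor by repeated parent steps; no deque or left-insertion. Pre_ restricts to Node_ID >= 0: on negative input neither program returns (A's while loop never ends).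
import Mathlib
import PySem

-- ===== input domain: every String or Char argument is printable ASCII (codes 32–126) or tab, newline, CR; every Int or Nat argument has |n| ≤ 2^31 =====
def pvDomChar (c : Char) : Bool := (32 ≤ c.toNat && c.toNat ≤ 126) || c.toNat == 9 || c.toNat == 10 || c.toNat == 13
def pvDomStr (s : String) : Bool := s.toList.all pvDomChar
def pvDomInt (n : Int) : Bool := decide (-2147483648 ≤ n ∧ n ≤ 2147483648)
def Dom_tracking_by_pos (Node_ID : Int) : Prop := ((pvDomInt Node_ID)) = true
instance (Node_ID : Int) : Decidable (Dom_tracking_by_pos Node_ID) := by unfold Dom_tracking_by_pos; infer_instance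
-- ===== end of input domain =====

-- B computes the node's depth first and then builds the root-first path forward,
-- recomputing each ancestor by repeated parent steps (objective: alternative).

-- ===== PORT A =====
-- A's while loop, appendleft-ing into the deque `res`; `fuel` is a totality
-- device only (fuel = tmp.toNat + 1 suffices: the parent (tmp-1)//5 decreases
-- strictly for tmp ≥ 1; on negative tmp Python A never returns — outside Pre_).
def tracking_by_pos_loop : Nat → Int → List Int → List Int
  | 0, _, res => res
  | fuel + 1, tmp, res =>
    if tmp = 0 then 0 :: res
    else tracking_by_pos_loop fuel (PySem.Int.floordiv (tmp - 1) 5) (tmp :: res)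

def tracking_by_pos (Node_ID : Int) : List Int :=
  tracking_by_pos_loop (Node_ID.toNat + 1) Node_ID []

-- ===== PORT B =====
-- _parent
def pvParent (n : Int) : Int := PySem.Int.floordiv (n - 1) 5

-- _depth: count parent steps until 0; `fuel` is a totality device only
-- (n.toNat + 1 suffices; on negative n Python B never returns — outside Pre_).
def pvDepth : Nat → Int → Nat
  | 0, _ => 0
  | fuel + 1, n => if n = 0 then 0 else pvDepth fuel (pvParent n) + 1

-- _ancestor: apply _parent k times (the `for _ in range(k)` loop)
def pvAncestor : Int → Nat → Int
  | n, 0 => n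
  | n, k + 1 => pvAncestor (pvParent n) k

-- the comprehension [_ancestor(Node_ID, D - i) for i in range(D + 1)]
def tracking_by_pos_alt (Node_ID : Int) : List Int :=
  let D := pvDepth (Node_ID.toNat + 1) Node_ID
  (List.range (D + 1)).map (fun i => pvAncestor Node_ID (D - i))

-- ===== PRECONDITION & SPEC =====
-- Pre_ excludes negative Node_ID, on which neither Python program returns
-- (A's while loop never reaches 0; B's depth loop likewise).
def Pre_tracking_by_pos (Node_ID : Int) : Prop := 0 ≤ Node_ID
instance (Node_ID : Int) : Decidable (Pre_tracking_by_pos Node_ID) := by unfold Pre_tracking_by_pos; infer_instance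
def pvWitness_tracking_by_pos : Int := (37)

def Spec_tracking_by_pos (Node_ID : Int) (out : List Int) : Prop := out = tracking_by_pos_alt Node_ID
instance (Node_ID : Int) (out : List Int) : Decidable (Spec_tracking_by_pos Node_ID out) := by unfold Spec_tracking_by_pos; infer_instance

-- ===== CLAIM (what is proved, stated in full; the proofs are below) =====
def Claim_equal_tracking_by_pos : Prop := ∀ (Node_ID : Int), Dom_tracking_by_pos Node_ID → Pre_tracking_by_pos Node_ID → Spec_tracking_by_pos Node_ID (tracking_by_pos Node_ID)

-- ===== LEMMAS AND PROOFS =====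
-- common reference shape: the root-first parent chain, built back-to-front
def pvPathRec : Nat → Int → List Int
  | 0, _ => []
  | fuel + 1, n => if n = 0 then [0] else pvPathRec fuel (pvParent n) ++ [n]

theorem pvParent_bounds (n : Int) (h : 1 ≤ n) : 0 ≤ pvParent n ∧ pvParent n < n := by
  unfold pvParent
  rw [PySem.Int.floordiv_eq_ediv_of_pos (by omega : (0:Int) < 5)]
  constructor
  · exact Int.ediv_nonneg (by omega) (by omega)
  · have := Int.ediv_le_self 5 (show (0:Int) ≤ n - 1 by omega)
    omega

-- A's loop equals the reference chain with the accumulator appended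
theorem tracking_by_pos_loop_eq (fuel : Nat) (tmp : Int) (res : List Int) :
    tracking_by_pos_loop fuel tmp res = pvPathRec fuel tmp ++ res := by
  induction fuel generalizing tmp res with
  | zero => simp [tracking_by_pos_loop, pvPathRec]
  | succ f ih =>
    rw [tracking_by_pos_loop, pvPathRec]
    split
    · simp
    · rw [ih]; simp [pvParent]

-- B's depth-and-ancestor comprehension equals the reference chain (given enough fuel)
theorem pv_alt_eq (fuel : Nat) (n : Int) (h0 : 0 ≤ n) (hf : n.toNat < fuel) :
    (List.range (pvDepth fuel n + 1)).map (fun i => pvAncestor n (pvDepth fuel n - i))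
      = pvPathRec fuel n := by
  induction fuel generalizing n with
  | zero => omega
  | succ f ih =>
    by_cases hn : n = 0
    · subst hn
      simp [pvDepth, pvPathRec, pvAncestor, List.range_succ]
    · have h1 : 1 ≤ n := by omega
      obtain ⟨hp0, hplt⟩ := pvParent_bounds n h1
      have hD : pvDepth (f + 1) n = pvDepth f (pvParent n) + 1 := by
        rw [pvDepth]; simp [hn]
      have hP : pvPathRec (f + 1) n = pvPathRec f (pvParent n) ++ [n] := by
        rw [pvPathRec]; simp [hn]
      rw [hD, hP]
      set D' := pvDepth f (pvParent n) with hD'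
      rw [List.range_succ, List.map_append]
      have hlast : [pvAncestor n (D' + 1 - (D' + 1))] = [n] := by
        simp [pvAncestor]
      rw [List.map_singleton]
      have hmap : (List.range (D' + 1)).map (fun i => pvAncestor n (D' + 1 - i))
          = (List.range (D' + 1)).map (fun i => pvAncestor (pvParent n) (D' - i)) := by
        apply List.map_congr_left
        intro i hi
        rw [List.mem_range] at hi
        have : D' + 1 - i = (D' - i) + 1 := by omega
        rw [this, pvAncestor]
      rw [hlast, hmap]
      congr 1
      exact ih (pvParent n) hp0 (by omega)

-- ===== VERDICT (by name: the statement is the Claim_ definition above) =====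
theorem tracking_by_pos_spec : Claim_equal_tracking_by_pos := by
  intro n _ hpre
  unfold Spec_tracking_by_pos tracking_by_pos tracking_by_pos_alt
  rw [tracking_by_pos_loop_eq, List.append_nil]
  exact (pv_alt_eq (n.toNat + 1) n hpre (by omega)).symm
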